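-- pv_equiv track=rewrite | github.com/McClain-Thiel/ChatNAV | benchmark/run_gartner_benchmark.py | extract_mmps_from_nmer
-- ===== SOURCE A (Python) =====
-- def extract_mmps_from_nmer(nmer: str, hla_alleles: list[str]):
--     """Generate all 8-11mer windows from a nmer."""
--     windows = []
--     for pep_len in [8, 9, 10, 11]:
--         for start in range(len(nmer) - pep_len + 1):
--             pep = nmer[start:start + pep_len]
--             if all(c in 'ACDEFGHIKLMNPQRSTVWY' for c in pep):
--                 for hla in hla_alleles:
--                     windows.append((pep, hla))
--     return windows
-- ===== SOURCE B (Python) =====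
-- def extract_mmps_from_nmer(nmer: str, hla_alleles: list[str]):
--     """Generate all 8-11mer windows from a nmer (prefix-sum validity table)."""
--     aa = set('ACDEFGHIKLMNPQRSTVWY')
--     n = len(nmer)
--     # pre[i] = number of valid residues among the first i characters
--     pre = [0]
--     acc = 0
--     for c in nmer:
--         acc += c in aa
--         pre.append(acc)
--     windows = []
--     for pep_len in [8, 9, 10, 11]:
--         for start in range(n + 1 - pep_len):
--             if pre[start + pep_len] - pre[start] == pep_len:
--                 pep = nmer[start:start + pep_len]
--                 windows.extend((pep, hla) for hla in hla_alleles)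
--     return windows
-- ===== Notes on version B (the rewrite author's own statement) =====
-- stated objective: faster
-- what changed: Replaces the per-window all(...) character scan with a prefix-sum table of valid-residue counts built in one pass over nmer, so each window's validity becomes an O(1) subtraction test.
import Mathlib
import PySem

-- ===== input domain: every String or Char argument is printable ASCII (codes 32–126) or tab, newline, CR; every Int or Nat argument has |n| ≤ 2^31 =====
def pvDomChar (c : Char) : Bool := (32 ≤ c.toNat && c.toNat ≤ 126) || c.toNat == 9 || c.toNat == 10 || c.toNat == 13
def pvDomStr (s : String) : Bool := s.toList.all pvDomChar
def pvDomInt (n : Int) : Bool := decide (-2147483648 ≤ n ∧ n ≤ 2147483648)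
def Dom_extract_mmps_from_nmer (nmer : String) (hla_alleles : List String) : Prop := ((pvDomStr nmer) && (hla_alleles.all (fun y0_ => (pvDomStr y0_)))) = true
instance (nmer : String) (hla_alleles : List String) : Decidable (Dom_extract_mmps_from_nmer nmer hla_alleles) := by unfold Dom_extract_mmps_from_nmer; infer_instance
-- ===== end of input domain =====

-- B replaces A's per-window all(...) scan by a one-pass prefix-sum table of valid-residue
-- counts, turning each window's validity check into a single subtraction (objective: faster).

-- the amino-acid alphabet literal 'ACDEFGHIKLMNPQRSTVWY' shared by both sources
def pvAA : List Char := "ACDEFGHIKLMNPQRSTVWY".toList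

-- ===== PORT A =====
-- `c in 'ACDE…'` on a single character c is membership in the alphabet (exact: c has length 1)
def extract_mmps_from_nmer (nmer : String) (hla_alleles : List String) : List (String × String) :=
  let cs := nmer.toList
  [8, 9, 10, 11].foldl (fun windows (pep_len : Nat) =>
    (PySem.List.pyRange 0 ((cs.length : Int) - (pep_len : Int) + 1) 1).foldl (fun windows start =>
      let pep := PySem.List.slice cs (some start) (some (start + (pep_len : Int)))
      if pep.all (fun c => pvAA.contains c) then
        hla_alleles.foldl (fun windows hla => windows ++ [(String.ofList pep, hla)]) windows
      else windows) windows) []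

-- ===== PORT B =====
def pvValid (c : Char) : Bool := pvAA.contains c

-- the `for c in nmer` loop accumulating acc and appending: pre = acc₀ :: buildPre cs acc₀
def pvBuildPre : List Char → Nat → List Nat
  | [], _ => []
  | c :: t, acc =>
      let acc' := acc + (if pvValid c then 1 else 0)
      acc' :: pvBuildPre t acc'

def extract_mmps_from_nmer_alt (nmer : String) (hla_alleles : List String) : List (String × String) :=
  let cs := nmer.toList
  let pre := 0 :: pvBuildPre cs 0
  [8, 9, 10, 11].foldl (fun windows (pep_len : Nat) =>
    (List.range (cs.length + 1 - pep_len)).foldl (fun windows start =>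
      if pre.getD (start + pep_len) 0 - pre.getD start 0 == pep_len then
        windows ++ hla_alleles.map (fun hla => (String.ofList ((cs.drop start).take pep_len), hla))
      else windows) windows) []

-- ===== PRECONDITION & SPEC =====
def Spec_extract_mmps_from_nmer (nmer : String) (hla_alleles : List String) (out : List (String × String)) : Prop := out = extract_mmps_from_nmer_alt nmer hla_alleles
instance (nmer : String) (hla_alleles : List String) (out : List (String × String)) : Decidable (Spec_extract_mmps_from_nmer nmer hla_alleles out) := by unfold Spec_extract_mmps_from_nmer; infer_instance

-- ===== CLAIM (what is proved, stated in full; the proofs are below) =====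
def Claim_equal_extract_mmps_from_nmer : Prop := ∀ (nmer : String) (hla_alleles : List String), Dom_extract_mmps_from_nmer nmer hla_alleles → Spec_extract_mmps_from_nmer nmer hla_alleles (extract_mmps_from_nmer nmer hla_alleles)

-- ===== LEMMAS AND PROOFS =====

-- the prefix table reads back the count of valid residues in the first i characters
theorem pvPre_getD (cs : List Char) (acc i : Nat) (hi : i ≤ cs.length) :
    (acc :: pvBuildPre cs acc).getD i 0 = acc + (cs.take i).countP pvValid := by
  induction cs generalizing acc i with
  | nil =>
      have h0 : i = 0 := by simpa using hi
      subst h0; simp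
  | cons c t ih =>
      cases i with
      | zero => simp
      | succ j =>
          have hj : j ≤ t.length := by simpa using hi
          simp only [pvBuildPre, List.getD_cons_succ, List.take_succ_cons, List.countP_cons]
          rw [ih (acc + (if pvValid c then 1 else 0)) j hj]
          by_cases h : pvValid c <;> simp [h] <;> omega

-- the O(1) subtraction test equals A's full-window scan
theorem pvCond_eq (cs : List Char) (s L : Nat) (h : s + L ≤ cs.length) :
    ((0 :: pvBuildPre cs 0).getD (s + L) 0 - (0 :: pvBuildPre cs 0).getD s 0 == L)
      = ((cs.drop s).take L).all (fun c => pvAA.contains c) := by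
  rw [pvPre_getD cs 0 (s + L) h, pvPre_getD cs 0 s (by omega)]
  simp only [Nat.zero_add, List.take_add, List.countP_append, Nat.add_sub_cancel_left]
  set seg := (cs.drop s).take L with hseg
  have hlen : seg.length = L := by
    rw [hseg, List.length_take, List.length_drop]; omega
  have hiff : seg.countP pvValid = L ↔ seg.all (fun c => pvAA.contains c) = true := by
    rw [← hlen, List.countP_eq_length]
    simp [pvValid, List.all_eq_true]
  rcases Bool.eq_false_or_eq_true (seg.all (fun c => pvAA.contains c)) with ha | ha <;> rw [ha]
  · simp [hiff.mpr ha]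
  · have hne : seg.countP pvValid ≠ L := fun hc => by
      have := hiff.mp hc; rw [this] at ha; exact Bool.noConfusion ha
    simp [hne]

-- the inner double loop of A equals B's for every window length
theorem pvInner_eq (cs : List Char) (hla_alleles : List String) (L : Nat) (w : List (String × String)) :
    (PySem.List.pyRange 0 ((cs.length : Int) - (L : Int) + 1) 1).foldl (fun windows start =>
      let pep := PySem.List.slice cs (some start) (some (start + (L : Int)))
      if pep.all (fun c => pvAA.contains c) then
        hla_alleles.foldl (fun windows hla => windows ++ [(String.ofList pep, hla)]) windows
      else windows) w
    = (List.range (cs.length + 1 - L)).foldl (fun windows start =>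
      if (0 :: pvBuildPre cs 0).getD (start + L) 0 - (0 :: pvBuildPre cs 0).getD start 0 == L then
        windows ++ hla_alleles.map (fun hla => (String.ofList ((cs.drop start).take L), hla))
      else windows) w := by
  rw [PySem.List.pyRange_one, List.foldl_map]
  have hnat : ((cs.length : Int) - (L : Int) + 1 - 0).toNat = cs.length + 1 - L := by omega
  rw [hnat]
  apply PySem.List.foldl_congr_mem
  intro acc s hs
  have hsL : s + L ≤ cs.length := by
    have := List.mem_range.mp hs; omega
  simp only [Int.zero_add]
  rw [PySem.List.slice_natCast_add]
  rw [← pvCond_eq cs s L hsL, PySem.List.foldl_append_singleton_eq_map]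

-- ===== VERDICT (by name: the statement is the Claim_ definition above) =====
theorem extract_mmps_from_nmer_spec : Claim_equal_extract_mmps_from_nmer := by
  intro nmer hla_alleles _
  unfold Spec_extract_mmps_from_nmer extract_mmps_from_nmer extract_mmps_from_nmer_alt
  apply PySem.List.foldl_congr_mem
  intro acc L _
  exact pvInner_eq nmer.toList hla_alleles L acc
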